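-- pv_equiv track=rewrite | github.com/ajaythakur3369/GeeksforGeeks | 18_January_2024.py | min_sprinklers
-- ===== SOURCE A (Python) =====
-- def min_sprinklers(gallery, n):
--     spk = []
--
--     for i in range(n):
--         if gallery[i] != -1:
--             spk.append((max(0, i - gallery[i]), min(n - 1, i + gallery[i])))
--
--     spk.sort()
--
--     start = 0
--     i = 0
--     ans = 0
--
--     while start < n:
--         maxr = -1e9
--         while i < len(spk):
--             if spk[i][0] > start:
--                 break
--
--             maxr = max(maxr, spk[i][1])
--             i += 1
--
--         if maxr < start:
--             return -1
--
--         ans += 1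
--         start = maxr + 1
--
--     return ans
-- ===== SOURCE B (Python) =====
-- def min_sprinklers(gallery, n):
--     if n <= 0:
--         return 0
--     big = n + 1
--     # reach[l] = farthest right endpoint among sprinkler ranges whose clamped range starts at l
--     reach = [-1] * n
--     for i in range(n):
--         g = gallery[i]
--         if g != -1:
--             l = max(0, i - g)
--             r = min(n - 1, i + g)
--             if l <= r and r > reach[l]:
--                 reach[l] = r
--     # dp[j] = minimum number of sprinklers covering cells 0..j-1 (big = impossible)
--     dp = [big] * (n + 1)
--     dp[0] = 0
--     for j in range(1, n + 1):
--         best = big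
--         for l in range(0, j):
--             if reach[l] >= j - 1 and dp[l] < best:
--                 best = dp[l]
--         if best < big:
--             dp[j] = best + 1
--     return dp[n] if dp[n] < big else -1
-- ===== Notes on version B (the rewrite author's own statement) =====
-- stated objective: alternative
-- what changed: Replaces A's sort-the-intervals-then-greedy-sweep by dynamic programming: a per-cell max-reach array plus dp[j] = minimum sprinklers covering the first j cells, with -1 read off when dp[n] stays infinite.
import Mathlib
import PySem

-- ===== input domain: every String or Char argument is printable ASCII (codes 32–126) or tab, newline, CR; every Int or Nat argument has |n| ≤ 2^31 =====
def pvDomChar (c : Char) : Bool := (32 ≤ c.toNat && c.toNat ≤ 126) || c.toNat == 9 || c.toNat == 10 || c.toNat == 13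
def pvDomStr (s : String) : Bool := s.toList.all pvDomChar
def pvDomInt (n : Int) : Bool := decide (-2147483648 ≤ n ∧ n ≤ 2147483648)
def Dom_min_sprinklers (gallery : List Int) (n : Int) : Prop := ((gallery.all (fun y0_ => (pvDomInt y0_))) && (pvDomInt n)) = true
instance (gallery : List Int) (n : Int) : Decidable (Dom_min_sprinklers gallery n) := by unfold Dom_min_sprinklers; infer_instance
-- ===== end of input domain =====

-- B replaces A's sort-the-intervals-then-greedy-sweep by dynamic programming over prefixes
-- (dp[j] = min sprinklers covering the first j cells, over a per-cell max-reach array);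
-- objective: alternative algorithm, not claimed faster.

-- ===== PORT A =====
-- body of "for i in range(n): if gallery[i] != -1: spk.append(...)"
def pvStepA (gallery : List Int) (n : Int) (spk : List (Int × Int)) (i : Int) : List (Int × Int) :=
  let g := PySem.List.pyGetD gallery i 0
  if g ≠ -1 then spk ++ [(max 0 (i - g), min (n - 1) (i + g))] else spk

def pvMkSpk (gallery : List Int) (n : Int) : List (Int × Int) :=
  (PySem.List.pyRange 0 n 1).foldl (pvStepA gallery n) []

-- inner "while i < len(spk)" with break: the pointer i into sorted spk becomes the suffix list;
-- returns (maxr, remaining suffix)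
def pvScanA (start : Int) : List (Int × Int) → Int → Int × List (Int × Int)
  | [], maxr => (maxr, [])
  | p :: rest, maxr =>
    if p.1 > start then (maxr, p :: rest)
    else pvScanA start rest (max maxr p.2)

-- outer "while start < n"; Python's float sentinel -1e9 is value-exact as the integer -10^9 here
def pvLoopA (n : Int) (rest : List (Int × Int)) (start ans : Int) : Int :=
  if _h : start < n then
    let res := pvScanA start rest (-1000000000)
    if _h2 : res.1 < start then -1
    else pvLoopA n res.2 (res.1 + 1) (ans + 1)
  else ans
termination_by (n - start).toNat
decreasing_by simp only [res] at _h2 ⊢; omega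

def min_sprinklers (gallery : List Int) (n : Int) : Int :=
  pvLoopA n (PySem.List.sorted2 (pvMkSpk gallery n) Prod.fst Prod.snd) 0 0

-- ===== PORT B =====
-- body of B's reach-building loop: reach[l] = max(reach[l], r) for nonempty clamped ranges
def pvStepB (gallery : List Int) (n : Int) (reach : List Int) (i : Int) : List Int :=
  let g := PySem.List.pyGetD gallery i 0
  if g ≠ -1 then
    let l := max 0 (i - g)
    let r := min (n - 1) (i + g)
    if l ≤ r ∧ r > PySem.List.pyGetD reach l 0 then PySem.List.pySetD reach l r else reach
  else reach

def pvMkReach (gallery : List Int) (n : Int) : List Int :=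
  (PySem.List.pyRange 0 n 1).foldl (pvStepB gallery n) (List.replicate n.toNat (-1))

-- inner "for l in range(0, j): if reach[l] >= j - 1 and dp[l] < best: best = dp[l]"
def pvInner (reach dp : List Int) (j big : Int) : Int :=
  (PySem.List.pyRange 0 j 1).foldl
    (fun best l =>
      if PySem.List.pyGetD reach l 0 ≥ j - 1 ∧ PySem.List.pyGetD dp l 0 < best
      then PySem.List.pyGetD dp l 0 else best) big

-- outer "for j in range(1, n + 1): … if best < big: dp[j] = best + 1"
def pvDpLoop (reach : List Int) (n big : Int) (dp0 : List Int) : List Int :=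
  (PySem.List.pyRange 1 (n + 1) 1).foldl
    (fun dp j =>
      if pvInner reach dp j big < big then PySem.List.pySetD dp j (pvInner reach dp j big + 1) else dp)
    dp0

def min_sprinklers_alt (gallery : List Int) (n : Int) : Int :=
  if n ≤ 0 then 0
  else
    let big := n + 1
    let reach := pvMkReach gallery n
    let dp := pvDpLoop reach n big (PySem.List.pySetD (List.replicate (n.toNat + 1) big) 0 0)
    if PySem.List.pyGetD dp n 0 < big then PySem.List.pyGetD dp n 0 else -1

-- ===== PRECONDITION & SPEC =====
-- Pre_ excludes exactly the inputs where Python A raises IndexError (n > len(gallery));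
-- B raises there too.
def Pre_min_sprinklers (gallery : List Int) (n : Int) : Prop := n ≤ (gallery.length : Int)
instance (gallery : List Int) (n : Int) : Decidable (Pre_min_sprinklers gallery n) := by
  unfold Pre_min_sprinklers; infer_instance

def pvWitness_min_sprinklers : List Int × Int := ([2, -1, 0], 3)

def Spec_min_sprinklers (gallery : List Int) (n : Int) (out : Int) : Prop := out = min_sprinklers_alt gallery n
instance (gallery : List Int) (n : Int) (out : Int) : Decidable (Spec_min_sprinklers gallery n out) := by unfold Spec_min_sprinklers; infer_instance

-- ===== CLAIM (what is proved, stated in full; the proofs are below) =====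
def Claim_equal_min_sprinklers : Prop := ∀ (gallery : List Int) (n : Int), Dom_min_sprinklers gallery n → Pre_min_sprinklers gallery n → Spec_min_sprinklers gallery n (min_sprinklers gallery n)

-- ===== LEMMAS AND PROOFS =====

-- the abstract greedy A simulates: m = farthest right endpoint among intervals
-- with left endpoint ≤ start (folded on top of start-1)
def pvG (n : Int) (P : List (Int × Int)) (start ans : Int) : Int :=
  if _h : start < n then
    let m := ((P.filter (fun p => decide (p.1 ≤ start))).map Prod.snd).foldl max (start - 1)
    if _h2 : m < start then -1
    else pvG n P (m + 1) (ans + 1)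
  else ans
termination_by (n - start).toNat
decreasing_by simp only [m] at _h2 ⊢; omega

-- ---- foldl max toolbox ----
theorem pv_le_foldl_max (a : Int) (l : List Int) : a ≤ l.foldl max a := by
  induction l generalizing a with
  | nil => simp
  | cons x l ih => exact le_trans (le_max_left a x) (ih (max a x))

theorem pv_mem_le_foldl_max {x : Int} {l : List Int} (a : Int) (h : x ∈ l) : x ≤ l.foldl max a := by
  induction l generalizing a with
  | nil => cases h
  | cons y l ih =>
    rcases List.mem_cons.mp h with rfl | h'
    · exact le_trans (le_max_right a x) (pv_le_foldl_max _ l)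
    · exact ih _ h'

theorem pv_foldl_max_base {a c : Int} (l : List Int) (h : a ≤ c) :
    l.foldl max c = max c (l.foldl max a) := by
  induction l generalizing a c with
  | nil => simp [max_eq_left h]
  | cons x l ih =>
    simp only [List.foldl_cons]
    rw [ih (max_le_max h le_rfl), max_assoc]
    congr 1
    exact (max_eq_right (le_trans (le_max_right a x) (pv_le_foldl_max _ l))).symm ▸ rfl

theorem pv_foldl_max_const {a : Int} {l : List Int} (h : ∀ x ∈ l, x ≤ a) : l.foldl max a = a := by
  induction l with
  | nil => rfl
  | cons x l ih =>
    simp only [List.foldl_cons, max_eq_left (h x (List.mem_cons_self))]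
    exact ih (fun y hy => h y (List.mem_cons_of_mem _ hy))

theorem pv_foldl_max_perm {l₁ l₂ : List Int} (h : l₁.Perm l₂) (a : Int) :
    l₁.foldl max a = l₂.foldl max a :=
  List.Perm.foldl_eq (rcomm := ⟨fun _ _ _ => max_right_comm _ _ _⟩) h a

theorem pv_foldl_max_mem (a : Int) (l : List Int) : l.foldl max a = a ∨ l.foldl max a ∈ l := by
  induction l generalizing a with
  | nil => exact Or.inl rfl
  | cons x l ih =>
    simp only [List.foldl_cons]
    rcases ih (max a x) with h | h
    · by_cases hax : x ≤ a
      · rw [h, max_eq_left hax]; exact Or.inl rfl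
      · rw [h, max_eq_right (by omega : a ≤ x)]
        exact Or.inr (List.mem_cons_self)
    · exact Or.inr (List.mem_cons_of_mem _ h)

-- ---- min-fold toolbox (the shape of B's inner loop) ----
theorem pv_minfold_le_init (c : Int → Prop) [DecidablePred c] (d : Int → Int)
    (L : List Int) (b0 : Int) :
    L.foldl (fun best l => if c l ∧ d l < best then d l else best) b0 ≤ b0 := by
  induction L generalizing b0 with
  | nil => exact le_rfl
  | cons x L ih =>
    simp only [List.foldl_cons]
    split_ifs with h
    · exact le_trans (ih _) (le_of_lt h.2)
    · exact ih _

theorem pv_minfold_cases (c : Int → Prop) [DecidablePred c] (d : Int → Int)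
    (L : List Int) (b0 : Int) :
    L.foldl (fun best l => if c l ∧ d l < best then d l else best) b0 = b0 ∨
    ∃ l ∈ L, c l ∧ L.foldl (fun best l => if c l ∧ d l < best then d l else best) b0 = d l := by
  induction L generalizing b0 with
  | nil => exact Or.inl rfl
  | cons x L ih =>
    simp only [List.foldl_cons]
    split_ifs with h
    · rcases ih (d x) with h' | ⟨l, hl, hc, he⟩
      · exact Or.inr ⟨x, List.mem_cons_self, h.1, h'⟩
      · exact Or.inr ⟨l, List.mem_cons_of_mem _ hl, hc, he⟩
    · rcases ih b0 with h' | ⟨l, hl, hc, he⟩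
      · exact Or.inl h'
      · exact Or.inr ⟨l, List.mem_cons_of_mem _ hl, hc, he⟩

theorem pv_minfold_le (c : Int → Prop) [DecidablePred c] (d : Int → Int)
    (L : List Int) (b0 : Int) {l : Int} (hl : l ∈ L) (hc : c l) :
    L.foldl (fun best l => if c l ∧ d l < best then d l else best) b0 ≤ d l := by
  revert b0 hl
  induction L with
  | nil => intro b0 hl; cases hl
  | cons x L ih =>
    intro b0 hl
    simp only [List.foldl_cons]
    by_cases hx : l ∈ L
    · exact ih _ hx
    · have hlx : l = x := by
        rcases List.mem_cons.mp hl with h | h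
        · exact h
        · exact absurd h hx
      subst hlx
      have hstep : (if c l ∧ d l < b0 then d l else b0) ≤ d l := by
        split_ifs with h
        · exact le_rfl
        · by_cases hdb : d l < b0
          · exact absurd ⟨hc, hdb⟩ h
          · omega
      exact le_trans (pv_minfold_le_init c d L _) hstep

-- ---- filter prefix on a sorted list ----
theorem pv_filter_eq_takeWhile (s : Int) (l : List (Int × Int))
    (hl : l.Pairwise (fun a b => a.1 ≤ b.1)) :
    l.filter (fun p => decide (p.1 ≤ s)) = l.takeWhile (fun p => decide (p.1 ≤ s)) := by
  induction l with
  | nil => rfl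
  | cons p l ih =>
    rcases List.pairwise_cons.mp hl with ⟨hall, htail⟩
    by_cases hp : p.1 ≤ s
    · simp [List.filter_cons, List.takeWhile_cons, hp, ih htail]
    · have : l.filter (fun p => decide (p.1 ≤ s)) = [] := by
        apply List.filter_eq_nil_iff.mpr
        intro x hx
        have := hall x hx
        simp only [decide_eq_true_eq]
        omega
      simp [List.filter_cons, List.takeWhile_cons, hp, this]

-- ---- sorted2 is sorted by first component ----
theorem pv_insertBy_pairwise {α : Type} (R : α → α → Prop) (before : α → α → Bool)
    (htrans : ∀ a b c, R a b → R b c → R a c)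
    (h1 : ∀ a b, before a b = true → R a b) (h2 : ∀ a b, before a b = false → R b a)
    (x : α) (ys : List α) (hys : ys.Pairwise R) :
    (PySem.List.insertBy before x ys).Pairwise R := by
  induction ys with
  | nil => simp [PySem.List.insertBy]
  | cons y ys ih =>
    rcases List.pairwise_cons.mp hys with ⟨hall, htail⟩
    rw [PySem.List.insertBy]
    cases hb : before x y
    · simp only [Bool.false_eq_true, if_false]
      refine List.pairwise_cons.mpr ⟨?_, ih htail⟩
      intro z hz
      rcases (PySem.List.mem_insertBy _ _ _ _).mp hz with rfl | hz'
      · exact h2 _ _ hb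
      · exact hall z hz'
    · simp only [if_true]
      refine List.pairwise_cons.mpr ⟨?_, hys⟩
      intro z hz
      rcases List.mem_cons.mp hz with rfl | hz'
      · exact h1 x z hb
      · exact htrans x y z (h1 x y hb) (hall z hz')

theorem pv_sorted2_pairwise_fst (xs : List (Int × Int)) :
    (PySem.List.sorted2 xs Prod.fst Prod.snd).Pairwise (fun a b => a.1 ≤ b.1) := by
  have key : ∀ (ys acc : List (Int × Int)),
      acc.Pairwise (fun a b : Int × Int => a.1 ≤ b.1) →
      (ys.foldl (fun acc x => PySem.List.insertBy
          (fun a b : Int × Int => decide (a.1 < b.1) || (!decide (b.1 < a.1) && decide (a.2 < b.2)))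
          x acc) acc).Pairwise (fun a b : Int × Int => a.1 ≤ b.1) := by
    intro ys
    induction ys with
    | nil => exact fun acc h => h
    | cons x ys ih =>
      intro acc h
      simp only [List.foldl_cons]
      apply ih
      refine pv_insertBy_pairwise (fun a b : Int × Int => a.1 ≤ b.1) _ (fun a b c hab hbc => le_trans hab hbc) ?_ ?_ x acc h
      · intro a b hb
        simp only [Bool.or_eq_true, Bool.and_eq_true, decide_eq_true_eq,
          Bool.not_eq_true', decide_eq_false_iff_not] at hb
        rcases hb with hb | ⟨hb, _⟩ <;> omega
      · intro a b hb
        rcases Bool.or_eq_false_iff.mp hb with ⟨h1, _⟩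
        simp only [decide_eq_false_iff_not] at h1
        omega
  exact key xs [] List.Pairwise.nil

-- ---- A's inner-loop characterization ----
theorem pvScanA_eq (start : Int) (l : List (Int × Int)) (acc : Int) :
    pvScanA start l acc =
      (((l.takeWhile (fun p => decide (p.1 ≤ start))).map Prod.snd).foldl max acc,
       l.dropWhile (fun p => decide (p.1 ≤ start))) := by
  induction l generalizing acc with
  | nil => simp [pvScanA]
  | cons p l ih =>
    rw [pvScanA]
    by_cases hp : p.1 > start
    · have : decide (p.1 ≤ start) = false := by simp; omega
      simp [hp, List.takeWhile_cons, List.dropWhile_cons, this]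
    · have : decide (p.1 ≤ start) = true := by simp; omega
      simp only [if_neg hp, List.takeWhile_cons, List.dropWhile_cons, this, if_true,
        List.map_cons, List.foldl_cons]
      exact ih (max acc p.2)

-- ---- the reach array built by B ----
def pvBucket (Q : List (Int × Int)) (j : Int) : List Int :=
  (Q.filter (fun p => decide (p.1 ≤ p.2) && decide (p.1 = j))).map Prod.snd

-- max reach recorded at left endpoint l (-1 when none)
def pvR (Q : List (Int × Int)) (l : Int) : Int := (pvBucket Q l).foldl max (-1)

theorem pv_pyGetD_pySetD_int (xs : List Int) (l j v d : Int)
    (h0l : 0 ≤ l) (hl : l < (xs.length : Int)) (h0j : 0 ≤ j) :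
    PySem.List.pyGetD (PySem.List.pySetD xs l v) j d = if j = l then v else PySem.List.pyGetD xs j d := by
  have hl' : l.toNat < xs.length := by omega
  have el : l = (l.toNat : Int) := by omega
  have ej : j = (j.toNat : Int) := by omega
  rw [el, ej, PySem.List.pyGetD_pySetD_natCast xs l.toNat j.toNat v d hl']
  simp only [Int.natCast_inj]

-- joint invariant of the two build loops: after processing the same indices,
-- reach[j] is the max right endpoint (base -1) of recorded intervals with left endpoint j
theorem pv_build (gallery : List Int) (n : Int) (is : List Int) (P0 : List (Int × Int)) (b0 : List Int)
    (hlen : b0.length = n.toNat)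
    (hinv : ∀ j : Int, 0 ≤ j → j < n →
      PySem.List.pyGetD b0 j 0 = pvR P0 j) :
    (is.foldl (pvStepB gallery n) b0).length = n.toNat ∧
    ∀ j : Int, 0 ≤ j → j < n →
      PySem.List.pyGetD (is.foldl (pvStepB gallery n) b0) j 0 =
        pvR (is.foldl (pvStepA gallery n) P0) j := by
  induction is generalizing P0 b0 with
  | nil => exact ⟨hlen, hinv⟩
  | cons i is ih =>
    simp only [List.foldl_cons]
    apply ih
    · -- length preserved by one step
      simp only [pvStepB]
      split_ifs with hg hc
      · rw [PySem.List.length_pySetD]; exact hlen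
      · exact hlen
      · exact hlen
    · -- invariant preserved by one step
      intro j h0j hjn
      simp only [pvR, pvBucket] at hinv ⊢
      simp only [pvStepA, pvStepB]
      by_cases hgne : PySem.List.pyGetD gallery i 0 ≠ -1
      · rw [if_pos hgne, if_pos hgne]
        generalize hldef : max 0 (i - PySem.List.pyGetD gallery i 0) = l
        generalize hrdef : min (n - 1) (i + PySem.List.pyGetD gallery i 0) = r
        have h0l : 0 ≤ l := by omega
        have hrn : r ≤ n - 1 := by omega
        have hfil : (List.filter (fun p : Int × Int => decide (p.1 ≤ p.2) && decide (p.1 = j)) [(l, r)])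
            = if l ≤ r ∧ l = j then [(l, r)] else [] := by
          simp only [List.filter_cons, List.filter_nil]
          by_cases hv : l ≤ r <;> by_cases he : l = j <;> simp [hv, he]
        rw [List.filter_append, List.map_append, hfil]
        by_cases hv : l ≤ r
        · have hln : l < n := by omega
          by_cases hc : r > PySem.List.pyGetD b0 l 0
          · rw [if_pos ⟨hv, hc⟩, pv_pyGetD_pySetD_int b0 l j r 0 h0l (by rw [hlen]; omega) h0j]
            by_cases he : j = l
            · subst he
              rw [if_pos rfl, if_pos ⟨hv, rfl⟩]
              simp only [List.map_cons, List.map_nil]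
              rw [List.foldl_append, ← hinv j h0j hjn]
              simp only [List.foldl_cons, List.foldl_nil]
              omega
            · have hne : ¬ (l ≤ r ∧ l = j) := fun hh => he hh.2.symm
              rw [if_neg he, if_neg hne]
              simp only [List.map_nil, List.append_nil]
              exact hinv j h0j hjn
          · -- r ≤ reach[l]: B leaves reach alone; the new interval is absorbed by the max
            rw [if_neg (fun hh => hc hh.2)]
            by_cases he : l = j
            · subst he
              rw [if_pos ⟨hv, rfl⟩]
              simp only [List.map_cons, List.map_nil]
              rw [List.foldl_append, ← hinv l h0l hln]
              simp only [List.foldl_cons, List.foldl_nil]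
              omega
            · rw [if_neg (fun hh => he hh.2)]
              simp only [List.map_nil, List.append_nil]
              exact hinv j h0j hjn
        · -- l > r: interval recorded by A but never useful; B skips it, bucket filter drops it
          rw [if_neg (fun hh => hv hh.1), if_neg (fun hh => hv hh.1)]
          simp only [List.map_nil, List.append_nil]
          exact hinv j h0j hjn
      · simp only [if_neg hgne]
        exact hinv j h0j hjn

-- every interval A records has a nonnegative left endpoint
theorem pv_mkSpk_fst_nonneg (gallery : List Int) (n : Int) (is : List Int) (P0 : List (Int × Int))
    (h0 : ∀ p ∈ P0, 0 ≤ p.1) :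
    ∀ p ∈ is.foldl (pvStepA gallery n) P0, 0 ≤ p.1 := by
  induction is generalizing P0 with
  | nil => exact h0
  | cons i is ih =>
    simp only [List.foldl_cons]
    apply ih
    intro p hp
    simp only [pvStepA] at hp
    split_ifs at hp
    · rcases List.mem_append.mp hp with hp' | hp'
      · exact h0 p hp'
      · simp only [List.mem_singleton] at hp'
        subst hp'
        simp
    · exact h0 p hp

-- ---- the greedy reach function F and its chain ----
def pvF (P : List (Int × Int)) (s : Int) : Int :=
  ((P.filter (fun p => decide (p.1 ≤ s))).map Prod.snd).foldl max (s - 1)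

def pvGc (P : List (Int × Int)) : Nat → Int
  | 0 => 0
  | k + 1 => pvF P (pvGc P k) + 1

theorem pvF_ge (P : List (Int × Int)) (s : Int) : s - 1 ≤ pvF P s :=
  pv_le_foldl_max _ _

theorem pvGc_nonneg (P : List (Int × Int)) (k : Nat) : 0 ≤ pvGc P k := by
  induction k with
  | zero => exact le_rfl
  | succ k ih =>
    have := pvF_ge P (pvGc P k)
    simp only [pvGc]
    omega

theorem pvGc_le_succ (P : List (Int × Int)) (k : Nat) : pvGc P k ≤ pvGc P (k + 1) := by
  have := pvF_ge P (pvGc P k)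
  simp only [pvGc]
  omega

theorem pvGc_mono (P : List (Int × Int)) {k m : Nat} (h : k ≤ m) : pvGc P k ≤ pvGc P m := by
  induction m with
  | zero => simp_all
  | succ m ih =>
    rcases Nat.lt_or_ge k (m + 1) with h' | h'
    · exact le_trans (ih (by omega)) (pvGc_le_succ P m)
    · have : k = m + 1 := by omega
      subst this; exact le_rfl

theorem pvGc_stall (P : List (Int × Int)) (i : Nat) (h : pvGc P (i + 1) ≤ pvGc P i) :
    ∀ k : Nat, pvGc P (i + k) = pvGc P i := by
  have heq : pvGc P (i + 1) = pvGc P i := le_antisymm h (pvGc_le_succ P i)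
  intro k
  induction k with
  | zero => rfl
  | succ k ih =>
    show pvGc P ((i + k) + 1) = pvGc P i
    simp only [pvGc, ih]
    have : pvF P (pvGc P i) + 1 = pvGc P (i + 1) := rfl
    omega

-- pvR l bounds pvF s when l ≤ s
theorem pvR_le_F (P : List (Int × Int)) {s l : Int} (hs : 0 ≤ s) (h0l : 0 ≤ l) (hls : l ≤ s) :
    pvR P l ≤ pvF P s := by
  rcases pv_foldl_max_mem (-1) (pvBucket P l) with hc | hc
  · calc pvR P l = -1 := hc
      _ ≤ s - 1 := by omega
      _ ≤ pvF P s := pvF_ge P s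
  · rcases List.mem_map.mp hc with ⟨p, hp, he⟩
    rcases List.mem_filter.mp hp with ⟨hP, hcond⟩
    simp only [Bool.and_eq_true, decide_eq_true_eq] at hcond
    have hmem : p ∈ P.filter (fun p => decide (p.1 ≤ s)) :=
      List.mem_filter.mpr ⟨hP, by simp; omega⟩
    calc pvR P l = p.2 := he.symm
      _ ≤ pvF P s := pv_mem_le_foldl_max _ (List.mem_map_of_mem hmem)

-- when pvF exceeds its base, some nonempty recorded range realizes it
theorem pvF_extract (P : List (Int × Int)) (hP : ∀ p ∈ P, 0 ≤ p.1) {s j : Int}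
    (hsj : s < j) (hF : j - 1 ≤ pvF P s) :
    ∃ l : Int, 0 ≤ l ∧ l ≤ s ∧ j - 1 ≤ pvR P l := by
  rcases pv_foldl_max_mem (s - 1) ((P.filter (fun p => decide (p.1 ≤ s))).map Prod.snd) with hc | hc
  · exfalso
    rw [pvF] at hF
    omega
  · rcases List.mem_map.mp hc with ⟨p, hp, he⟩
    rcases List.mem_filter.mp hp with ⟨hPm, hle⟩
    simp only [decide_eq_true_eq] at hle
    refine ⟨p.1, hP p hPm, hle, ?_⟩
    have hlr : p.1 ≤ p.2 := by
      have : p.2 = pvF P s := he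
      omega
    have hmem : p ∈ P.filter (fun q => decide (q.1 ≤ q.2) && decide (q.1 = p.1)) :=
      List.mem_filter.mpr ⟨hPm, by simp [hlr]⟩
    have : p.2 ≤ pvR P p.1 := by
      unfold pvR pvBucket
      exact pv_mem_le_foldl_max _ (List.mem_map_of_mem hmem)
    have : p.2 = pvF P s := he
    omega

-- ---- A simulates the abstract greedy ----
theorem pvA_eq_G (n : Int) (P spk cons rest : List (Int × Int)) (start ans : Int)
    (hperm : spk.Perm P) (hsort : spk.Pairwise (fun a b => a.1 ≤ b.1))
    (hsplit : spk = cons ++ rest) (hs : 0 ≤ start)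
    (hcons : ∀ p ∈ cons, p.1 ≤ start ∧ p.2 < start) :
    pvLoopA n rest start ans = pvG n P start ans := by
  rw [pvLoopA, pvG]
  by_cases h : start < n
  · simp only [dif_pos h]
    rw [pvScanA_eq]
    set tw := rest.takeWhile (fun p => decide (p.1 ≤ start)) with htw
    set dw := rest.dropWhile (fun p => decide (p.1 ≤ start)) with hdw
    set maxr := ((tw.map Prod.snd).foldl max (-1000000000)) with hmaxr
    have hrest_sorted : rest.Pairwise (fun a b : Int × Int => a.1 ≤ b.1) :=
      (hsplit ▸ hsort).sublist (List.sublist_append_right cons rest)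
    -- the G-side maximum equals max (start-1) maxr
    have hm : ((P.filter (fun p => decide (p.1 ≤ start))).map Prod.snd).foldl max (start - 1)
        = max (start - 1) maxr := by
      rw [← pv_foldl_max_perm ((hperm.filter _).map Prod.snd) (start - 1)]
      rw [hsplit, List.filter_append, pv_filter_eq_takeWhile start rest hrest_sorted, ← htw]
      have hcf : cons.filter (fun p => decide (p.1 ≤ start)) = cons := by
        apply List.filter_eq_self.mpr
        intro p hp
        simp only [decide_eq_true_eq]
        exact (hcons p hp).1
      rw [hcf, List.map_append, List.foldl_append]
      have hcmax : (cons.map Prod.snd).foldl max (start - 1) = start - 1 := by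
        apply pv_foldl_max_const
        intro x hx
        rcases List.mem_map.mp hx with ⟨p, hp, rfl⟩
        have := (hcons p hp).2
        omega
      rw [hcmax, hmaxr]
      exact pv_foldl_max_base _ (by omega)
    rw [hm]
    by_cases h2 : maxr < start
    · have : max (start - 1) maxr < start := by omega
      simp only [dif_pos h2, dif_pos this]
    · have hge : start ≤ maxr := by omega
      have hmx : max (start - 1) maxr = maxr := by omega
      rw [hmx]
      simp only [dif_neg h2]
      -- recurse
      apply pvA_eq_G n P spk (cons ++ tw) dw (maxr + 1) (ans + 1) hperm hsort
      · rw [hsplit, htw, hdw, List.append_assoc, List.takeWhile_append_dropWhile]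
      · omega
      · intro p hp
        rcases List.mem_append.mp hp with hp' | hp'
        · have := hcons p hp'
          constructor <;> omega
        · constructor
          · have := List.mem_takeWhile_imp hp'
            simp only [decide_eq_true_eq] at this
            omega
          · have : p.2 ≤ maxr := pv_mem_le_foldl_max _ (List.mem_map_of_mem hp')
            omega
  · simp only [dif_neg h]
termination_by (n - start).toNat
decreasing_by simp only [maxr, tw] at *; omega

-- ---- B's dp table: invariant and recurrence ----

-- dp values at indices < j determine pvInner at j
theorem pvInner_congr (reach dp1 dp2 : List Int) (j big : Int)
    (h : ∀ l : Int, 0 ≤ l → l < j → PySem.List.pyGetD dp1 l 0 = PySem.List.pyGetD dp2 l 0) :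
    pvInner reach dp1 j big = pvInner reach dp2 j big := by
  unfold pvInner
  apply PySem.List.foldl_congr_mem
  intro b l hl
  rcases (PySem.List.mem_pyRange_one).mp hl with ⟨h1, h2⟩
  rw [h l h1 h2]

def pvDp0 (n : Int) : List Int := PySem.List.pySetD (List.replicate (n.toNat + 1) (n + 1)) 0 0

def pvDpPartial (reach : List Int) (n j : Int) : List Int :=
  (PySem.List.pyRange 1 (j + 1) 1).foldl
    (fun dp t =>
      if pvInner reach dp t (n + 1) < n + 1 then PySem.List.pySetD dp t (pvInner reach dp t (n + 1) + 1) else dp)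
    (pvDp0 n)

theorem pv_dp_inv (reach : List Int) (n : Int) (hn : 1 ≤ n) :
    ∀ j : Int, 0 ≤ j → j ≤ n →
      (pvDpPartial reach n j).length = n.toNat + 1 ∧
      PySem.List.pyGetD (pvDpPartial reach n j) 0 0 = 0 ∧
      (∀ t : Int, 1 ≤ t → t ≤ j →
        PySem.List.pyGetD (pvDpPartial reach n j) t 0 =
          (if pvInner reach (pvDpPartial reach n j) t (n + 1) < n + 1
           then pvInner reach (pvDpPartial reach n j) t (n + 1) + 1 else n + 1)) ∧
      (∀ t : Int, j < t → t ≤ n → PySem.List.pyGetD (pvDpPartial reach n j) t 0 = n + 1) := by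
  intro j h0j
  induction j, h0j using Int.le_induction with
  | base =>
    intro _
    have he : pvDpPartial reach n 0 = pvDp0 n := by
      unfold pvDpPartial
      rw [PySem.List.pyRange_one_eq_nil (by omega)]
      rfl
    have hlen0 : (pvDp0 n).length = n.toNat + 1 := by
      unfold pvDp0
      rw [PySem.List.length_pySetD, List.length_replicate]
    refine ⟨by rw [he]; exact hlen0, ?_, ?_, ?_⟩
    · rw [he]
      unfold pvDp0
      rw [pv_pyGetD_pySetD_int _ 0 0 0 0 le_rfl (by rw [List.length_replicate]; omega) le_rfl]
      simp
    · intro t ht1 ht2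
      omega
    · intro t ht1 ht2
      rw [he]
      unfold pvDp0
      rw [pv_pyGetD_pySetD_int _ 0 t 0 0 le_rfl (by rw [List.length_replicate]; omega) (by omega)]
      rw [if_neg (by omega)]
      rw [PySem.List.pyGetD_eq_getElem _ _ (by omega) (by rw [List.length_replicate]; omega)]
      simp
  | succ j hj0 ih =>
    intro hjn
    obtain ⟨hlen, h0, hrec, hbig⟩ := ih (by omega)
    have hsplit : pvDpPartial reach n (j + 1) =
        (if pvInner reach (pvDpPartial reach n j) (j + 1) (n + 1) < n + 1
         then PySem.List.pySetD (pvDpPartial reach n j) (j + 1)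
           (pvInner reach (pvDpPartial reach n j) (j + 1) (n + 1) + 1)
         else pvDpPartial reach n j) := by
      unfold pvDpPartial
      rw [PySem.List.pyRange_one_succ_right (by omega), List.foldl_append]
      rfl
    -- entries at indices ≠ j+1 are unchanged
    have hsame : ∀ t : Int, 0 ≤ t → t ≠ j + 1 →
        PySem.List.pyGetD (pvDpPartial reach n (j + 1)) t 0 =
        PySem.List.pyGetD (pvDpPartial reach n j) t 0 := by
      intro t h0t hne
      rw [hsplit]
      split_ifs with hc
      · rw [pv_pyGetD_pySetD_int _ (j + 1) t _ 0 (by omega) (by rw [hlen]; omega) h0t]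
        rw [if_neg hne]
      · rfl
    have hlen' : (pvDpPartial reach n (j + 1)).length = n.toNat + 1 := by
      rw [hsplit]
      split_ifs with hc
      · rw [PySem.List.length_pySetD]; exact hlen
      · exact hlen
    -- pvInner at any t ≤ j+1 is the same on the old and new tables
    have hinner : ∀ t : Int, t ≤ j + 1 →
        pvInner reach (pvDpPartial reach n (j + 1)) t (n + 1) =
        pvInner reach (pvDpPartial reach n j) t (n + 1) := by
      intro t ht
      apply pvInner_congr
      intro l h0l hlt
      exact hsame l h0l (by omega)
    refine ⟨hlen', ?_, ?_, ?_⟩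
    · rw [hsame 0 le_rfl (by omega)]; exact h0
    · intro t ht1 ht2
      by_cases he : t = j + 1
      · subst he
        rw [hinner _ le_rfl]
        rw [hsplit]
        split_ifs with hc
        · rw [pv_pyGetD_pySetD_int _ (j + 1) (j + 1) _ 0 (by omega) (by rw [hlen]; omega) (by omega)]
          rw [if_pos rfl]
        · exact hbig (j + 1) (by omega) (by omega)
      · rw [hsame t (by omega) he, hinner t (by omega)]
        exact hrec t ht1 (by omega)
    · intro t ht1 ht2
      rw [hsame t (by omega) (by omega)]
      exact hbig t (by omega) ht2

-- the final dp table and its facts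
def pvDpT (gallery : List Int) (n : Int) : List Int :=
  pvDpLoop (pvMkReach gallery n) n (n + 1) (pvDp0 n)

theorem pvDpT_facts (gallery : List Int) (n : Int) (hn : 1 ≤ n) :
    PySem.List.pyGetD (pvDpT gallery n) 0 0 = 0 ∧
    (∀ t : Int, 1 ≤ t → t ≤ n →
      PySem.List.pyGetD (pvDpT gallery n) t 0 =
        (if pvInner (pvMkReach gallery n) (pvDpT gallery n) t (n + 1) < n + 1
         then pvInner (pvMkReach gallery n) (pvDpT gallery n) t (n + 1) + 1 else n + 1)) := by
  obtain ⟨_, h0, hrec, _⟩ := pv_dp_inv (pvMkReach gallery n) n hn n (by omega) le_rfl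
  exact ⟨h0, hrec⟩

-- reach table read back as pvR of A's interval list
theorem pv_reach_eq (gallery : List Int) (n : Int) :
    ∀ l : Int, 0 ≤ l → l < n →
      PySem.List.pyGetD (pvMkReach gallery n) l 0 = pvR (pvMkSpk gallery n) l := by
  intro l h0l hln
  have := pv_build gallery n (PySem.List.pyRange 0 n 1) [] (List.replicate n.toNat (-1))
    (by simp)
    (by
      intro j h0j hjn
      have : PySem.List.pyGetD (List.replicate n.toNat (-1)) j 0 = -1 := by
        rw [PySem.List.pyGetD_eq_getElem _ _ h0j (by simp; omega)]
        simp
      rw [this]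
      simp [pvR, pvBucket])
  exact this.2 l h0l hln

-- dp values are within [0, n+1]
theorem pv_dp_bounds (gallery : List Int) (n : Int) (hn : 1 ≤ n) :
    ∀ t : Int, 0 ≤ t → t ≤ n →
      0 ≤ PySem.List.pyGetD (pvDpT gallery n) t 0 ∧
      PySem.List.pyGetD (pvDpT gallery n) t 0 ≤ n + 1 := by
  intro t h0t htn
  obtain ⟨h0, hrec⟩ := pvDpT_facts gallery n hn
  by_cases ht0 : t = 0
  · subst ht0; rw [h0]; omega
  · rw [hrec t (by omega) htn]
    split_ifs with hc
    · rcases pv_minfold_cases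
        (fun l => PySem.List.pyGetD (pvMkReach gallery n) l 0 ≥ t - 1)
        (fun l => PySem.List.pyGetD (pvDpT gallery n) l 0)
        (PySem.List.pyRange 0 t 1) (n + 1) with hcs | ⟨l, hl, _, he⟩
      · rw [pvInner] at hc
        omega
      · rcases (PySem.List.mem_pyRange_one).mp hl with ⟨h1, h2⟩
        have := (pv_dp_bounds gallery n hn l h1 (by omega)).1
        rw [pvInner] at hc ⊢
        rw [he] at hc ⊢
        omega
    · omega
termination_by t => t.toNat
decreasing_by omega

-- L1: a finite dp value t is realized by the greedy chain: pvGc (dp[t]) reaches t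
theorem pv_dp_chain (gallery : List Int) (n : Int) (hn : 1 ≤ n) :
    ∀ t : Int, 0 ≤ t → t ≤ n →
      PySem.List.pyGetD (pvDpT gallery n) t 0 < n + 1 →
      t ≤ pvGc (pvMkSpk gallery n) (PySem.List.pyGetD (pvDpT gallery n) t 0).toNat := by
  intro t h0t htn hlt
  obtain ⟨h0, hrec⟩ := pvDpT_facts gallery n hn
  by_cases ht0 : t = 0
  · subst ht0
    rw [h0]
    exact pvGc_nonneg _ _
  · rw [hrec t (by omega) htn] at hlt ⊢
    split_ifs at hlt ⊢ with hc
    · rcases pv_minfold_cases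
        (fun l => PySem.List.pyGetD (pvMkReach gallery n) l 0 ≥ t - 1)
        (fun l => PySem.List.pyGetD (pvDpT gallery n) l 0)
        (PySem.List.pyRange 0 t 1) (n + 1) with hcs | ⟨l, hl, hcl, he⟩
      · rw [pvInner] at hc
        omega
      · rcases (PySem.List.mem_pyRange_one).mp hl with ⟨h1, h2⟩
        rw [pvInner] at hc ⊢
        rw [he] at hc ⊢
        -- dp[l] < n+1, so IH gives l ≤ g(dp[l])
        have hIH := pv_dp_chain gallery n hn l h1 (by omega) (by omega)
        have hdl0 : 0 ≤ PySem.List.pyGetD (pvDpT gallery n) l 0 :=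
          (pv_dp_bounds gallery n hn l h1 (by omega)).1
        set k := (PySem.List.pyGetD (pvDpT gallery n) l 0).toNat with hk
        have hRl : t - 1 ≤ pvR (pvMkSpk gallery n) l := by
          rw [← pv_reach_eq gallery n l h1 (by omega)]
          exact hcl
        have hs0 : 0 ≤ pvGc (pvMkSpk gallery n) k := pvGc_nonneg _ _
        have hRF : pvR (pvMkSpk gallery n) l ≤ pvF (pvMkSpk gallery n) (pvGc (pvMkSpk gallery n) k) :=
          pvR_le_F _ hs0 h1 hIH
        have hsucc : pvGc (pvMkSpk gallery n) (k + 1) = pvF (pvMkSpk gallery n) (pvGc (pvMkSpk gallery n) k) + 1 := rfl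
        have htoNat : (PySem.List.pyGetD (pvDpT gallery n) l 0 + 1).toNat = k + 1 := by omega
        rw [htoNat]
        omega
    · omega
termination_by t => t.toNat
decreasing_by omega

-- L2: whenever the greedy chain reaches t in k steps, dp[t] ≤ k
theorem pv_chain_dp (gallery : List Int) (n : Int) (hn : 1 ≤ n) :
    ∀ k : Nat, ∀ t : Int, 0 ≤ t → t ≤ n → t ≤ pvGc (pvMkSpk gallery n) k →
      PySem.List.pyGetD (pvDpT gallery n) t 0 ≤ (k : Int) := by
  intro k
  induction k with
  | zero =>
    intro t h0t htn hg
    have : pvGc (pvMkSpk gallery n) 0 = 0 := rfl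
    have ht0 : t = 0 := by omega
    subst ht0
    rw [(pvDpT_facts gallery n hn).1]
    simp
  | succ k ih =>
    intro t h0t htn hg
    by_cases hk : t ≤ pvGc (pvMkSpk gallery n) k
    · have := ih t h0t htn hk
      omega
    · push_neg at hk
      have hsucc : pvGc (pvMkSpk gallery n) (k + 1) = pvF (pvMkSpk gallery n) (pvGc (pvMkSpk gallery n) k) + 1 := rfl
      have hs0 : 0 ≤ pvGc (pvMkSpk gallery n) k := pvGc_nonneg _ _
      have ht1 : 1 ≤ t := by omega
      have hF : t - 1 ≤ pvF (pvMkSpk gallery n) (pvGc (pvMkSpk gallery n) k) := by omega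
      obtain ⟨l, h0l, hls, hRl⟩ := pvF_extract (pvMkSpk gallery n)
        (pv_mkSpk_fst_nonneg gallery n _ [] (by simp)) hk hF
      have hlt : l < t := by omega
      have hln : l < n := by omega
      have hIH := ih l h0l (by omega) hls
      obtain ⟨_, hrec⟩ := pvDpT_facts gallery n hn
      rw [hrec t ht1 htn]
      have hcl : PySem.List.pyGetD (pvMkReach gallery n) l 0 ≥ t - 1 := by
        rw [pv_reach_eq gallery n l h0l hln]
        exact hRl
      have hmin : pvInner (pvMkReach gallery n) (pvDpT gallery n) t (n + 1) ≤
          PySem.List.pyGetD (pvDpT gallery n) l 0 := by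
        rw [pvInner]
        exact pv_minfold_le
          (fun l => PySem.List.pyGetD (pvMkReach gallery n) l 0 ≥ t - 1)
          (fun l => PySem.List.pyGetD (pvDpT gallery n) l 0)
          (PySem.List.pyRange 0 t 1) (n + 1)
          ((PySem.List.mem_pyRange_one).mpr ⟨h0l, hlt⟩) hcl
      have hub := (pv_dp_bounds gallery n hn t h0t htn).2
      by_cases hkb : (k : Int) < n + 1
      · rw [if_pos (by omega)]
        omega
      · split_ifs with hc
        · omega
        · omega

-- strict greedy chains advance at least one cell per step
theorem pvGc_ge_index (P : List (Int × Int)) (i : Nat)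
    (hstrict : ∀ m : Nat, m < i → pvGc P m < pvGc P (m + 1)) :
    (i : Int) ≤ pvGc P i := by
  induction i with
  | zero => exact le_rfl
  | succ i ih =>
    have h1 := hstrict i (by omega)
    have h2 := ih (fun m hm => hstrict m (by omega))
    push_cast
    omega

-- L3: running the abstract greedy from chain point i returns dp[n]'s verdict
theorem pvG_run (gallery : List Int) (n : Int) (hn : 1 ≤ n) (i : Nat)
    (hlt : ∀ m : Nat, m < i → pvGc (pvMkSpk gallery n) m < n)
    (hstrict : ∀ m : Nat, m < i → pvGc (pvMkSpk gallery n) m < pvGc (pvMkSpk gallery n) (m + 1)) :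
    pvG n (pvMkSpk gallery n) (pvGc (pvMkSpk gallery n) i) (i : Int) =
      (if PySem.List.pyGetD (pvDpT gallery n) n 0 < n + 1
       then PySem.List.pyGetD (pvDpT gallery n) n 0 else -1) := by
  rw [pvG]
  by_cases h : pvGc (pvMkSpk gallery n) i < n
  · simp only [dif_pos h]
    have hmF : ((( pvMkSpk gallery n).filter (fun p => decide (p.1 ≤ pvGc (pvMkSpk gallery n) i))).map Prod.snd).foldl max (pvGc (pvMkSpk gallery n) i - 1)
        = pvF (pvMkSpk gallery n) (pvGc (pvMkSpk gallery n) i) := rfl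
    rw [hmF]
    have hsucc : pvGc (pvMkSpk gallery n) (i + 1) = pvF (pvMkSpk gallery n) (pvGc (pvMkSpk gallery n) i) + 1 := rfl
    by_cases h2 : pvF (pvMkSpk gallery n) (pvGc (pvMkSpk gallery n) i) < pvGc (pvMkSpk gallery n) i
    · -- stall: the chain is stuck below n forever, so dp[n] must be infinite
      simp only [dif_pos h2]
      have hstall : ∀ k : Nat, pvGc (pvMkSpk gallery n) (i + k) = pvGc (pvMkSpk gallery n) i :=
        pvGc_stall _ i (by omega)
      have hallk : ∀ k : Nat, pvGc (pvMkSpk gallery n) k < n := by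
        intro k
        rcases Nat.lt_or_ge k i with hk | hk
        · exact lt_of_le_of_lt (pvGc_mono _ (by omega)) h
        · have : pvGc (pvMkSpk gallery n) k = pvGc (pvMkSpk gallery n) i := by
            have := hstall (k - i)
            rwa [Nat.add_sub_cancel' hk] at this
          omega
      rw [if_neg]
      intro hfin
      have := pv_dp_chain gallery n hn n (by omega) le_rfl hfin
      have := hallk (PySem.List.pyGetD (pvDpT gallery n) n 0).toNat
      omega
    · simp only [dif_neg h2]
      have he : pvF (pvMkSpk gallery n) (pvGc (pvMkSpk gallery n) i) + 1 = pvGc (pvMkSpk gallery n) (i + 1) := rfl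
      rw [he]
      have hcast : ((i : Int) + 1) = ((i + 1 : Nat) : Int) := by push_cast; ring
      rw [hcast]
      apply pvG_run gallery n hn (i + 1)
      · intro m hm
        rcases Nat.lt_or_ge m i with hmi | hmi
        · exact hlt m hmi
        · have : m = i := by omega
          subst this; exact h
      · intro m hm
        rcases Nat.lt_or_ge m i with hmi | hmi
        · exact hstrict m hmi
        · have : m = i := by omega
          subst this
          omega
  · simp only [dif_neg h]
    push_neg at h
    -- chain reached n after i steps; dp[n] = i
    have hle : PySem.List.pyGetD (pvDpT gallery n) n 0 ≤ (i : Int) :=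
      pv_chain_dp gallery n hn i n (by omega) le_rfl h
    have hi1 : 1 ≤ i := by
      by_contra hi0
      have : i = 0 := by omega
      subst this
      have : pvGc (pvMkSpk gallery n) 0 = 0 := rfl
      omega
    have hin : (i : Int) ≤ n := by
      have h1 := hlt (i - 1) (by omega)
      have h2 := pvGc_ge_index (pvMkSpk gallery n) (i - 1) (fun m hm => hstrict m (by omega))
      have : ((i - 1 : Nat) : Int) = (i : Int) - 1 := by omega
      omega
    have hfin : PySem.List.pyGetD (pvDpT gallery n) n 0 < n + 1 := by omega
    have hge : (i : Int) ≤ PySem.List.pyGetD (pvDpT gallery n) n 0 := by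
      by_contra hgt
      push_neg at hgt
      have hchain := pv_dp_chain gallery n hn n (by omega) le_rfl hfin
      have hd0 : 0 ≤ PySem.List.pyGetD (pvDpT gallery n) n 0 :=
        (pv_dp_bounds gallery n hn n (by omega) le_rfl).1
      have hki : (PySem.List.pyGetD (pvDpT gallery n) n 0).toNat < i := by omega
      have := hlt _ hki
      omega
    rw [if_pos hfin]
    omega
termination_by (n - pvGc (pvMkSpk gallery n) i).toNat
decreasing_by
  have : pvGc (pvMkSpk gallery n) i < pvGc (pvMkSpk gallery n) (i + 1) := by omega
  omega

-- ===== VERDICT (by name: the statement is the Claim_ definition above) =====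
theorem min_sprinklers_spec : Claim_equal_min_sprinklers := by
  intro gallery n _hdom _hpre
  unfold Spec_min_sprinklers min_sprinklers min_sprinklers_alt
  have hA := pvA_eq_G n (pvMkSpk gallery n)
    (PySem.List.sorted2 (pvMkSpk gallery n) Prod.fst Prod.snd) []
    (PySem.List.sorted2 (pvMkSpk gallery n) Prod.fst Prod.snd) 0 0
    (PySem.List.sorted2_perm _ _ _ _)
    (pv_sorted2_pairwise_fst _)
    (by simp) le_rfl (by simp)
  rw [hA]
  by_cases hn : n ≤ 0
  · rw [if_pos hn, pvG]
    simp only [dif_neg (by omega : ¬ (0:Int) < n)]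
  · rw [if_neg hn]
    have hn1 : 1 ≤ n := by omega
    have h0 : pvGc (pvMkSpk gallery n) 0 = 0 := rfl
    have := pvG_run gallery n hn1 0 (by omega) (by omega)
    rw [h0] at this
    simpa [pvDpT, pvDp0] using this
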